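-- pv_equiv track=rewrite | github.com/FabianWe/schulze_voting | schulze_voting/schulze_voting.py | rank_p
-- ===== SOURCE A (Python) =====
-- from collections import defaultdict
--
-- def rank_p(p, n):
--     """Rank the matrix p and rank all options as described in SchulzeRes.
--
--     Inspired by <https://github.com/mgp/schulze-method/blob/master/schulze.py>.
--
--     Args:
--         p (list of list of int): The matrix p.
--         n (int): Number of options in the vote.
--
--     Returns:
--         list of list of int: A list describing which options
--             win against the other options. The first list contains all options
--             that are ranked highest, the next list all entries ranked second
--             best and so on.
--     """
--     candidate_wins = defaultdict(list)
--     for i in range(n):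
--         num_wins = 0
--         for j in range(n):
--             if i == j:
--                 continue
--             if p[i][j] > p[j][i]:
--                 num_wins += 1
--         candidate_wins[num_wins].append(i)
--     sorted_wins = sorted(candidate_wins.keys(), reverse=True)
--     return [candidate_wins[key] for key in sorted_wins]
-- ===== SOURCE B (Python) =====
-- def rank_p(p, n):
--     wins = [sum(1 for j in range(n) if j != i and p[i][j] > p[j][i])
--             for i in range(n)]
--     return [[i for i, w in enumerate(wins) if w == k]
--             for k in sorted(set(wins), reverse=True)]
-- ===== Notes on version B (the rewrite author's own statement) =====
-- stated objective: simpler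
-- what changed: Replaces the defaultdict bucketing plus key sort by computing the wins list once, sorting its distinct values descending, and emitting each tier as a comprehension over enumerate(wins).
import Mathlib
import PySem

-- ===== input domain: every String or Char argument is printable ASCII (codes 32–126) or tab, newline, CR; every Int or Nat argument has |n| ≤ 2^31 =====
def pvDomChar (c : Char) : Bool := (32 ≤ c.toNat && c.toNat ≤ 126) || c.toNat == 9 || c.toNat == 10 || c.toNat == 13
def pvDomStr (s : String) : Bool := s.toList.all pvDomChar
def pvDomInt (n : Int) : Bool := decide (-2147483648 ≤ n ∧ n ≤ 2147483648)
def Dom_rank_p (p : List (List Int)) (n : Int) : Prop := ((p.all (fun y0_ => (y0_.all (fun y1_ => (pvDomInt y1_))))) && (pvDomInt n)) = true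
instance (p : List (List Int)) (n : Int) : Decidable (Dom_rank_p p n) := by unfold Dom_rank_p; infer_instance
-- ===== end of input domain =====

-- B replaces A's defaultdict bucketing by: wins list, distinct win values sorted descending,
-- and one comprehension per tier (objective: simpler).

-- p[i][j] (total form; in range under Pre_)
def pvCell (p : List (List Int)) (i j : Int) : Int :=
  PySem.List.pyGetD (PySem.List.pyGetD p i []) j 0

-- ===== PORT A =====
def rank_p (p : List (List Int)) (n : Int) : List (List Int) :=
  let d := (PySem.List.pyRange 0 n 1).foldl
    (fun d i =>
      let numWins := (PySem.List.pyRange 0 n 1).foldl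
        (fun acc j =>
          if i = j then acc
          else if pvCell p i j > pvCell p j i then acc + 1 else acc) (0 : Int)
      d.modify numWins [] (· ++ [i]))
    PySem.Dict.empty
  let sortedWins := PySem.List.sorted d.keys (fun x => x) true
  sortedWins.map (fun key => d.getD key [])

-- ===== PORT B =====
def pvWinsB (p : List (List Int)) (n : Int) (i : Int) : Int :=
  ((PySem.List.pyRange 0 n 1).map
    (fun j => if j ≠ i ∧ pvCell p i j > pvCell p j i then (1 : Int) else 0)).sum

def rank_p_alt (p : List (List Int)) (n : Int) : List (List Int) :=
  let wins := (PySem.List.pyRange 0 n 1).map (fun i => pvWinsB p n i)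
  (PySem.List.sorted (PySem.Set.ofList wins) (fun x => x) true).map
    (fun k => ((PySem.List.enumerate wins 0).filter (fun iw => iw.2 == k)).map (fun iw => iw.1))

-- ===== PRECONDITION & SPEC =====
-- Pre_ excludes exactly the inputs where A raises IndexError: for n ≥ 2, p needs at least n
-- rows and row i all columns j < n with j ≠ i (so row n-1 needs only n-1 entries); for n ≤ 1
-- A indexes nothing.
def Pre_rank_p (p : List (List Int)) (n : Int) : Prop :=
  2 ≤ n → (n ≤ (p.length : Int) ∧ ∀ i ∈ List.range n.toNat,
    (if i = n.toNat - 1 then n - 1 else n) ≤ ((p.getD i []).length : Int))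
instance (p : List (List Int)) (n : Int) : Decidable (Pre_rank_p p n) := by unfold Pre_rank_p; infer_instance

def pvWitness_rank_p : List (List Int) × Int := ([[0, 2], [1, 0]], 2)

def Spec_rank_p (p : List (List Int)) (n : Int) (out : List (List Int)) : Prop := out = rank_p_alt p n
instance (p : List (List Int)) (n : Int) (out : List (List Int)) : Decidable (Spec_rank_p p n out) := by unfold Spec_rank_p; infer_instance

-- ===== CLAIM (what is proved, stated in full; the proofs are below) =====
def Claim_equal_rank_p : Prop := ∀ (p : List (List Int)) (n : Int), Dom_rank_p p n → Pre_rank_p p n → Spec_rank_p p n (rank_p p n)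

-- ===== LEMMAS AND PROOFS =====

-- A's counting loop equals B's 0/1 sum.
theorem pv_foldl_count (i : Int) (c : Int → Prop) [DecidablePred c] :
    ∀ (l : List Int) (acc : Int),
      l.foldl (fun acc j => if i = j then acc else if c j then acc + 1 else acc) acc
        = acc + (l.map (fun j => if j ≠ i ∧ c j then (1 : Int) else 0)).sum := by
  intro l
  induction l with
  | nil => intro acc; simp
  | cons x t ih =>
    intro acc
    simp only [List.foldl_cons, List.map_cons, List.sum_cons, ih]
    by_cases h : i = x
    · simp [h]
    · by_cases hc : c x
      · simp [h, hc, Ne.symm h]; ring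
      · simp [h, hc, Ne.symm h]

theorem pv_wins_eq (p : List (List Int)) (n i : Int) :
    (PySem.List.pyRange 0 n 1).foldl
        (fun acc j =>
          if i = j then acc
          else if pvCell p i j > pvCell p j i then acc + 1 else acc) (0 : Int)
      = pvWinsB p n i := by
  rw [pv_foldl_count i (fun j => pvCell p i j > pvCell p j i)]
  simp [pvWinsB]

-- A's bucket for key k is the ascending list of indices with win count k.
theorem pv_dict_getD (l : List Int) (w : Int → Int) (k : Int) :
    ((l.foldl (fun d i => d.modify (w i) [] (· ++ [i])) PySem.Dict.empty).getD k [])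
      = l.filter (fun i => w i == k) := by
  rw [show (l.foldl (fun d i => d.modify (w i) [] (· ++ [i])) PySem.Dict.empty)
      = ((l.map (fun i => ((w i, i) : Int × Int))).foldl (fun d q => d.modify q.1 [] (· ++ [q.2])) PySem.Dict.empty) by
    rw [List.foldl_map]]
  rw [PySem.Dict.getD_foldl_modify_append]
  simp [List.filter_map, Function.comp_def]

-- A's key list is the distinct win values in first-occurrence order, i.e. set(wins).
theorem pv_dict_keys (l : List Int) (w : Int → Int) :
    ((l.foldl (fun d i => d.modify (w i) [] (· ++ [i])) PySem.Dict.empty).keys)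
      = PySem.Set.ofList (l.map w) := by
  rw [PySem.Dict.keys_foldl_modify_key (key := w)]
  simp [PySem.Set.update, PySem.Set.ofList_eq_foldl]

-- B's enumerate-filter over the wins list is A's filter over range(n).
theorem pv_enum_filter (w : Int → Int) (n : Int) (hn : 0 ≤ n) (k : Int) :
    ((PySem.List.enumerate ((PySem.List.pyRange 0 n 1).map w) 0).filter (fun iw => iw.2 == k)).map (fun iw => iw.1)
      = (PySem.List.pyRange 0 n 1).filter (fun i => w i == k) := by
  rw [PySem.List.enumerate_eq_map_pyRange (d := 0)]
  have hlen : (PySem.List.len ((PySem.List.pyRange 0 n 1).map w)) = n := by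
    simp [PySem.List.len, PySem.List.length_pyRange_one]; omega
  rw [hlen]
  have hmap : (PySem.List.pyRange 0 n 1).map (fun j => (j, PySem.List.pyGetD ((PySem.List.pyRange 0 n 1).map w) j 0))
      = (PySem.List.pyRange 0 n 1).map (fun j => (j, w j)) := by
    apply List.map_congr_left
    intro j hj
    rw [PySem.List.mem_pyRange_one] at hj
    rw [PySem.List.pyGetD_map_pyRange_of_nonneg (h0 := hj.1) (h1 := hj.2)]
  rw [hmap]
  simp [List.filter_map, Function.comp_def]

theorem rank_p_spec : Claim_equal_rank_p := by
  intro p n _ _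
  show rank_p p n = rank_p_alt p n
  by_cases hn : 0 ≤ n
  · simp only [rank_p, rank_p_alt, pv_wins_eq, pv_dict_getD, pv_dict_keys,
      pv_enum_filter _ _ hn]
  · have h0 : PySem.List.pyRange 0 n 1 = [] :=
      PySem.List.pyRange_one_eq_nil (by omega)
    simp [rank_p, rank_p_alt, h0]
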